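-- pv_equiv track=rewrite | github.com/telltaleatheist/AudiobookGenerator | engines/f5_engine.py | chunk_text_for_f5
-- ===== SOURCE A (Python) =====
-- def chunk_text_for_f5(text, f5_config):
--     """Chunk text for F5-TTS based on configuration"""
--     max_chars = f5_config.get('chunk_max_chars', 350)
--
--     # F5-TTS can handle longer chunks, but we still chunk for memory management
--     if len(text) <= max_chars:
--         return [text]
--
--     import re
--
--     # Split by paragraphs first
--     paragraphs = re.split(r'\n\s*\n', text)
--     chunks = []
--     current_chunk = ""
--
--     for paragraph in paragraphs:
--         paragraph = paragraph.strip()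
--         if not paragraph:
--             continue
--
--         # If paragraph alone exceeds max, split by sentences
--         if len(paragraph) > max_chars:
--             sentences = re.split(r'(?<=[.!?])\s+', paragraph)
--             for sentence in sentences:
--                 if current_chunk and len(current_chunk) + len(sentence) + 1 > max_chars:
--                     if current_chunk:
--                         chunks.append(current_chunk.strip())
--                     current_chunk = sentence
--                 else:
--                     if current_chunk:
--                         current_chunk += " " + sentence
--                     else:
--                         current_chunk = sentence
--             continue
--
--         # If adding this paragraph would exceed max, start new chunk
--         if current_chunk and len(current_chunk) + len(paragraph) + 2 > max_chars:
--             if current_chunk: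
--                 chunks.append(current_chunk.strip())
--             current_chunk = paragraph
--         else:
--             if current_chunk:
--                 current_chunk += "\n\n" + paragraph
--             else:
--                 current_chunk = paragraph
--
--     # Add remaining text
--     if current_chunk:
--         chunks.append(current_chunk.strip())
--
--     return chunks
-- ===== SOURCE B (Python) =====
-- import re
--
-- def chunk_text_for_f5(text, f5_config):
--     """Chunk text for F5-TTS: flatten to units, then recursively cut off the
--     longest fitting prefix of units (sizes computed arithmetically) and join it."""
--     max_chars = f5_config.get('chunk_max_chars', 350)
--     if len(text) <= max_chars:
--         return [text]
--
--     # Phase 1: flat list of (unit_text, separator) pairs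
--     units = []
--     for para in re.split(r'\n\s*\n', text):
--         para = para.strip()
--         if not para:
--             continue
--         if len(para) > max_chars:
--             units += [(s, " ") for s in re.split(r'(?<=[.!?])\s+', para)]
--         else:
--             units.append((para, "\n\n"))
--
--     # Phase 2: recursive grouping — no accumulator string; each chunk's extent is
--     # decided purely by length arithmetic, then the chunk is built by one join.
--     def emit(units):
--         if not units:
--             return []
--         size = len(units[0][0])
--         j = 1
--         while j < len(units) and size + len(units[j][1]) + len(units[j][0]) <= max_chars:
--             size += len(units[j][1]) + len(units[j][0])
--             j += 1
--         chunk = units[0][0] + "".join(sep + s for s, sep in units[1:j])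
--         return [chunk.strip()] + emit(units[j:])
--
--     return emit(units)
-- ===== Notes on version B (the rewrite author's own statement) =====
-- stated objective: alternative
-- what changed: Replaces A's single pass with an incremental string accumulator and flush-on-overflow (nested paragraph/sentence loops sharing the accumulator) by a staged algorithm: flatten to (unit, separator) pairs, then recursively cut off the longest fitting prefix of units -- chunk extents decided purely by length arithmetic -- and materialize each chunk with one join.
import Mathlib
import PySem

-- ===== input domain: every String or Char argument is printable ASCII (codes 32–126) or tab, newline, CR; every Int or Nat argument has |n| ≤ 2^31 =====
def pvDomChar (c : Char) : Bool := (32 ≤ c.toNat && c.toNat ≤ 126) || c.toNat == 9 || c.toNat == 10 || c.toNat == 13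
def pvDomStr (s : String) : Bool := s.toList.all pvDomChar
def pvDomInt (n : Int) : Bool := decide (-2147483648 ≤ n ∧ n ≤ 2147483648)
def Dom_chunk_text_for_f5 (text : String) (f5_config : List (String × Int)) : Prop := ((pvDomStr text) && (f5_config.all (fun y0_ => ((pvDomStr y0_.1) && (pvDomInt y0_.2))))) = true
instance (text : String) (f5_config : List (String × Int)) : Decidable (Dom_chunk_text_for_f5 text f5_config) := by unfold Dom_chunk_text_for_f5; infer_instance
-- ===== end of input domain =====

-- B replaces A's single accumulator-string pass with flush-on-overflow by a staged algorithm: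
-- flatten to (unit, separator) pairs, then recursively cut off the longest fitting prefix
-- (extent decided by length arithmetic) and build each chunk with one join; return values proved equal.
-- ===== PORT A =====
-- shared exact hand-ports of the two regex splits A and B both call (re.split is not in PySem):
-- pvIsWs c = '\s' on the ASCII domain (space, tab, \n, \r)
def pvIsWs (c : Char) : Bool := c = ' ' || c = '\t' || c = '\n' || c = '\r'

-- re match of r'\n\s*\n' at position 0: greedy \s* then backtrack to the last '\n' in the
-- whitespace run; returns the remainder after the match (exact leftmost-greedy semantics)
def pvMatchParaSep (l : List Char) : Option (List Char) :=
  match l with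
  | [] => none
  | c :: rest =>
    if c = '\n' then
      let run := rest.takeWhile pvIsWs
      match (run.reverse).findIdx? (fun c => c = '\n') with
      | some j => some (rest.drop (run.length - j))
      | none => none
    else none

theorem pvMatchParaSep_length {l rest : List Char} (h : pvMatchParaSep l = some rest) :
    rest.length < l.length := by
  unfold pvMatchParaSep at h
  cases l with
  | nil => cases h
  | cons c rest =>
    simp only [] at h
    split at h
    · split at h
      · cases h
        simp only [List.length_drop, List.length_cons]
        omega
      · cases h
    · cases h

-- re.split(r'\n\s*\n', text): scan left to right, trying the match at every position
def pvSplitParas (acc l : List Char) : List (List Char) :=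
  match hm : pvMatchParaSep l with
  | some rest => acc :: pvSplitParas [] rest
  | none =>
    match l with
    | [] => [acc]
    | c :: rest => pvSplitParas (acc ++ [c]) rest
termination_by l.length
decreasing_by
  · exact pvMatchParaSep_length hm
  · simp

-- re.split(r'(?<=[.!?])\s+', l): prev is the character before the current position
-- (lookbehind), a match is prev ∈ [.!?] and a maximal nonempty whitespace run
def pvSplitSentsAux (acc : List Char) (prev : Char) (l : List Char) : List (List Char) :=
  match l with
  | [] => [acc]
  | c :: rest =>
    if (prev = '.' || prev = '!' || prev = '?') && pvIsWs c then
      acc ::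
        (match h : rest.dropWhile pvIsWs with
         | [] => [[]]
         | d :: ds => pvSplitSentsAux [d] d ds)

    else
      pvSplitSentsAux (acc ++ [c]) c rest
termination_by l.length
decreasing_by
  · have := List.length_dropWhile_le (p := pvIsWs) (l := rest)
    rw [h] at this
    simp only [List.length_cons] at this ⊢
    omega
  · simp

def pvSplitSents (l : List Char) : List (List Char) :=
  match l with
  | [] => [[]]
  | c :: rest => pvSplitSentsAux [c] c rest

-- A's inner sentence loop body
def pvStepSent (maxc : Int) (st : List (List Char) × List Char) (s : List Char) :
    List (List Char) × List Char :=
  if st.2 ≠ [] ∧ (st.2.length : Int) + (s.length : Int) + 1 > maxc then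
    (st.1 ++ [PySem.Chars.strip st.2], s)
  else if st.2 ≠ [] then (st.1, st.2 ++ ' ' :: s)
  else (st.1, s)

-- A's paragraph loop body
def pvStepPara (maxc : Int) (st : List (List Char) × List Char) (para : List Char) :
    List (List Char) × List Char :=
  let p := PySem.Chars.strip para
  if p = [] then st
  else if (p.length : Int) > maxc then (pvSplitSents p).foldl (pvStepSent maxc) st
  else if st.2 ≠ [] ∧ (st.2.length : Int) + (p.length : Int) + 2 > maxc then
    (st.1 ++ [PySem.Chars.strip st.2], p)
  else if st.2 ≠ [] then (st.1, st.2 ++ '\n' :: '\n' :: p)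
  else (st.1, p)

def chunk_text_for_f5 (text : String) (f5_config : List (String × Int)) : List String :=
  let maxc := PySem.Dict.getD (PySem.Dict.ofList f5_config) "chunk_max_chars" 350
  if (PySem.Str.len text : Int) ≤ maxc then [text]
  else
    let st := (pvSplitParas [] text.toList).foldl (pvStepPara maxc) ([], [])
    let chunks := if st.2 ≠ [] then st.1 ++ [PySem.Chars.strip st.2] else st.1
    chunks.map String.ofList

-- ===== PORT B =====
-- phase-1 body: the units a single paragraph contributes (with their separators)
def pvUnitsOf (maxc : Int) (para : List Char) : List (List Char × List Char) :=
  let p := PySem.Chars.strip para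
  if p = [] then []
  else if (p.length : Int) > maxc then (pvSplitSents p).map (fun s => (s, [' ']))
  else [(p, ['\n', '\n'])]

-- phase-2, the inner while loop: extend the group while the next unit still fits,
-- tracking only the running size; returns (group extension, remaining units)
def pvExtend (maxc size : Int) (us : List (List Char × List Char)) :
    List (List Char × List Char) × List (List Char × List Char) :=
  match us with
  | [] => ([], [])
  | u :: us' =>
    if size + (u.2.length : Int) + (u.1.length : Int) ≤ maxc then
      let r := pvExtend maxc (size + (u.2.length : Int) + (u.1.length : Int)) us'
      (u :: r.1, r.2)
    else ([], u :: us')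

theorem pvExtend_length (maxc size : Int) (us : List (List Char × List Char)) :
    (pvExtend maxc size us).2.length ≤ us.length := by
  induction us generalizing size with
  | nil => simp [pvExtend]
  | cons u us' ih =>
    unfold pvExtend
    dsimp only
    split
    · exact Nat.le_succ_of_le (ih _)
    · simp

-- phase-2, the recursion 'emit': cut off the longest fitting prefix, join it, recurse
def pvChunks (maxc : Int) (units : List (List Char × List Char)) : List (List Char) :=
  match units with
  | [] => []
  | u :: us =>
    let e := pvExtend maxc (u.1.length : Int) us
    PySem.Chars.strip (u.1 ++ (e.1.map (fun v => v.2 ++ v.1)).flatten) :: pvChunks maxc e.2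
termination_by units.length
decreasing_by
  have := pvExtend_length maxc (u.1.length : Int) us
  simp only [List.length_cons]
  omega

def chunk_text_for_f5_alt (text : String) (f5_config : List (String × Int)) : List String :=
  let maxc := PySem.Dict.getD (PySem.Dict.ofList f5_config) "chunk_max_chars" 350
  if (PySem.Str.len text : Int) ≤ maxc then [text]
  else
    let units := (pvSplitParas [] text.toList).foldl (fun us p => us ++ pvUnitsOf maxc p) []
    (pvChunks maxc units).map String.ofList

-- ===== PRECONDITION & SPEC =====
def Spec_chunk_text_for_f5 (text : String) (f5_config : List (String × Int)) (out : List String) : Prop := out = chunk_text_for_f5_alt text f5_config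
instance (text : String) (f5_config : List (String × Int)) (out : List String) : Decidable (Spec_chunk_text_for_f5 text f5_config out) := by unfold Spec_chunk_text_for_f5; infer_instance

-- ===== CLAIM (what is proved, stated in full; the proofs are below) =====
def Claim_equal_chunk_text_for_f5 : Prop := ∀ (text : String) (f5_config : List (String × Int)), Dom_chunk_text_for_f5 text f5_config → Spec_chunk_text_for_f5 text f5_config (chunk_text_for_f5 text f5_config)

-- ===== LEMMAS AND PROOFS =====

-- uniform step over a (unit, separator) pair: a proof-side view of A's two loop bodies
def pvStepUnit (maxc : Int) (st : List (List Char) × List Char) (u : List Char × List Char) :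
    List (List Char) × List Char :=
  if st.2 ≠ [] ∧ (st.2.length : Int) + (u.2.length : Int) + (u.1.length : Int) > maxc then
    (st.1 ++ [PySem.Chars.strip st.2], u.1)
  else if st.2 ≠ [] then (st.1, st.2 ++ u.2 ++ u.1)
  else (st.1, u.1)

theorem pvStepUnit_sent (maxc : Int) (st : List (List Char) × List Char) (s : List Char) :
    pvStepUnit maxc st (s, [' ']) = pvStepSent maxc st s := by
  unfold pvStepUnit pvStepSent
  simp only [List.length_cons, List.length_nil]
  have hiff : (st.2 ≠ [] ∧ (st.2.length : Int) + ((0 : Nat) + 1 : Nat) + (s.length : Int) > maxc)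
      ↔ (st.2 ≠ [] ∧ (st.2.length : Int) + (s.length : Int) + 1 > maxc) := by
    constructor <;> rintro ⟨h1, h2⟩ <;> exact ⟨h1, by push_cast at h2 ⊢; omega⟩
  rw [if_congr hiff rfl rfl]
  simp

theorem pvStepPara_eq_foldl_units (maxc : Int) (st : List (List Char) × List Char)
    (para : List Char) :
    pvStepPara maxc st para = (pvUnitsOf maxc para).foldl (pvStepUnit maxc) st := by
  unfold pvStepPara pvUnitsOf
  by_cases h0 : PySem.Chars.strip para = []
  · simp [h0]
  · simp only [h0, if_false]
    by_cases h1 : ((PySem.Chars.strip para).length : Int) > maxc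
    · simp only [if_pos h1, List.foldl_map]
      refine (PySem.List.foldl_congr_mem _ _ _ _ ?_).symm
      intro acc x _
      exact pvStepUnit_sent maxc acc x
    · simp only [if_neg h1, List.foldl_cons, List.foldl_nil, pvStepUnit]
      have hiff : (st.2 ≠ [] ∧ (st.2.length : Int) + (([('\n' : Char), '\n'] : List Char).length : Int)
            + ((PySem.Chars.strip para).length : Int) > maxc)
          ↔ (st.2 ≠ [] ∧ (st.2.length : Int) + ((PySem.Chars.strip para).length : Int) + 2 > maxc) := by
        simp only [List.length_cons, List.length_nil]
        constructor <;> rintro ⟨a, b⟩ <;> exact ⟨a, by push_cast at b ⊢; omega⟩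
      rw [if_congr hiff rfl rfl]
      simp

theorem foldl_stepUnit_flat (maxc : Int) (paras : List (List Char))
    (st : List (List Char) × List Char) :
    paras.foldl (pvStepPara maxc) st
      = (paras.flatMap (pvUnitsOf maxc)).foldl (pvStepUnit maxc) st := by
  induction paras generalizing st with
  | nil => rfl
  | cons p ps ih =>
    simp only [List.foldl_cons, List.flatMap_cons, List.foldl_append]
    rw [pvStepPara_eq_foldl_units, ih]

-- ---- nonemptiness of units ----

theorem pvIsWs_isspace {c : Char} (h : pvIsWs c = true) : PySem.Chars.isspace c = true := by
  unfold pvIsWs at h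
  rcases Bool.or_eq_true_iff.mp h with h | h
  · rcases Bool.or_eq_true_iff.mp h with h | h
    · rcases Bool.or_eq_true_iff.mp h with h | h <;>
        · rw [of_decide_eq_true h]; decide
    · rw [of_decide_eq_true h]; decide
  · rw [of_decide_eq_true h]; decide

-- "last char, if any, is not whitespace"
def pvLastNotWs (l : List Char) : Prop := ∀ c, l.getLast? = some c → pvIsWs c = false

theorem head?_dropWhile {α : Type} (p : α → Bool) (l : List α) {c : α}
    (h : (l.dropWhile p).head? = some c) : p c = false := by
  induction l with
  | nil => cases h
  | cons a l ih =>
    rw [List.dropWhile_cons] at h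
    split at h
    · exact ih h
    · next hp =>
      simp only [List.head?_cons, Option.some_inj] at h
      subst h
      exact Bool.eq_false_iff.mpr hp

theorem strip_lastNotWs (l : List Char) : pvLastNotWs (PySem.Chars.strip l) := by
  intro c hc
  unfold PySem.Chars.strip PySem.Chars.rstrip at hc
  rw [List.getLast?_reverse] at hc
  have hs := head?_dropWhile PySem.Chars.isspace ((PySem.Chars.lstrip l).reverse) hc
  cases hw : pvIsWs c
  · rfl
  · rw [pvIsWs_isspace hw] at hs; cases hs

theorem lastNotWs_suffix {l s : List Char} (hs : s <:+ l) (hne : s ≠ [])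
    (h : pvLastNotWs l) : pvLastNotWs s := by
  intro c hc
  obtain ⟨t, rfl⟩ := hs
  apply h
  rw [List.getLast?_append_of_ne_nil _ hne]
  exact hc

theorem lastNotWs_cons {c : Char} {l : List Char} (h : pvLastNotWs (c :: l)) (hne : l ≠ []) :
    pvLastNotWs l := by
  intro d hd
  apply h
  cases l with
  | nil => exact absurd rfl hne
  | cons e es => rw [List.getLast?_cons_cons]; exact hd

theorem allWs_lastNotWs_contra {l : List Char} (hne : l ≠ [])
    (hall : ∀ x ∈ l, pvIsWs x = true) (h : pvLastNotWs l) : False := by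
  rcases List.eq_nil_or_concat l with rfl | ⟨xs, x, rfl⟩
  · exact hne rfl
  have h1 : pvIsWs x = true := hall x (by simp)
  have h2 : pvIsWs x = false := h x (by simp)
  rw [h1] at h2; cases h2

theorem sentsAux_ne_nil : ∀ (acc : List Char) (prev : Char) (l : List Char),
    acc ≠ [] → pvLastNotWs l → ∀ s ∈ pvSplitSentsAux acc prev l, s ≠ [] := by
  intro acc prev l
  induction acc, prev, l using pvSplitSentsAux.induct with
  | case1 acc prev =>
    intro hacc _
    simpa [pvSplitSentsAux] using hacc
  | case2 acc prev c rest hcond ih =>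
    intro hacc hl s hs
    rw [pvSplitSentsAux, if_pos hcond] at hs
    have hcws : pvIsWs c = true := (Bool.and_eq_true_iff.mp hcond).2
    rcases List.mem_cons.mp hs with rfl | hs'
    · exact hacc
    · revert hs'
      split
      · next heq =>
        -- dropWhile = []: all of rest is whitespace, contradicting pvLastNotWs (c :: rest)
        exfalso
        cases hr : rest with
        | nil =>
          have hlc := hl c (by rw [hr]; rfl)
          rw [hcws] at hlc; cases hlc
        | cons r rs =>
          have hrest_ne : rest ≠ [] := by rw [hr]; simp
          have hlrest : pvLastNotWs rest := lastNotWs_cons hl hrest_ne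
          have hall : ∀ x ∈ rest, pvIsWs x = true := List.dropWhile_eq_nil_iff.mp heq
          exact allWs_lastNotWs_contra hrest_ne hall hlrest
      · next d ds heq =>
        intro hs'
        have hrest_ne : rest ≠ [] := by
          intro h0; rw [h0] at heq; cases heq
        have hlrest : pvLastNotWs rest := lastNotWs_cons hl hrest_ne
        have hsuff : (d :: ds) <:+ rest := heq ▸ List.dropWhile_suffix pvIsWs
        have hlds : pvLastNotWs ds := by
          by_cases hds : ds = []
          · intro x hx; rw [hds] at hx; cases hx
          · exact lastNotWs_cons (lastNotWs_suffix hsuff (by simp) hlrest) hds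
        exact ih d ds heq (by simp) hlds s hs'
  | case3 acc prev c rest hcond ih =>
    intro hacc hl s hs
    rw [pvSplitSentsAux, if_neg hcond] at hs
    refine ih (by simp) ?_ s hs
    by_cases hr : rest = []
    · intro x hx; rw [hr] at hx; cases hx
    · exact lastNotWs_cons hl hr

theorem splitSents_ne_nil (p : List Char) (hp : p ≠ []) (hlast : pvLastNotWs p) :
    ∀ s ∈ pvSplitSents p, s ≠ [] := by
  cases p with
  | nil => cases hp rfl
  | cons c rest =>
    unfold pvSplitSents
    refine sentsAux_ne_nil [c] c rest (by simp) ?_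
    by_cases hr : rest = []
    · intro x hx; rw [hr] at hx; cases hx
    · exact lastNotWs_cons hlast hr

theorem unitsOf_ne_nil (maxc : Int) (para : List Char) :
    ∀ u ∈ pvUnitsOf maxc para, u.1 ≠ [] := by
  intro u hu
  unfold pvUnitsOf at hu
  dsimp only at hu
  split at hu
  · cases hu
  · split at hu
    · simp only [List.mem_map] at hu
      obtain ⟨s, hs, rfl⟩ := hu
      exact splitSents_ne_nil _ (by assumption) (strip_lastNotWs para) s hs
    · simp only [List.mem_singleton] at hu
      subst hu
      assumption

-- ---- the packing equivalence: A's foldl over units = B's recursive grouping ----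

-- equation lemmas used by the packing proof
theorem pvExtend_cons (maxc size : Int) (u : List Char × List Char)
    (us : List (List Char × List Char)) :
    pvExtend maxc size (u :: us)
      = if size + (u.2.length : Int) + (u.1.length : Int) ≤ maxc then
          (u :: (pvExtend maxc (size + (u.2.length : Int) + (u.1.length : Int)) us).1,
           (pvExtend maxc (size + (u.2.length : Int) + (u.1.length : Int)) us).2)
        else ([], u :: us) := rfl

theorem pvChunks_cons (maxc : Int) (u : List Char × List Char)
    (us : List (List Char × List Char)) :
    pvChunks maxc (u :: us)
      = PySem.Chars.strip (u.1 ++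
          (((pvExtend maxc (u.1.length : Int) us).1.map (fun v => v.2 ++ v.1)).flatten))
        :: pvChunks maxc (pvExtend maxc (u.1.length : Int) us).2 := by
  rw [pvChunks]


def pvFinalize (st : List (List Char) × List Char) : List (List Char) :=
  if st.2 ≠ [] then st.1 ++ [PySem.Chars.strip st.2] else st.1

theorem pack_eq (maxc : Int) : ∀ (us : List (List Char × List Char)),
    (∀ u ∈ us, u.1 ≠ []) →
    ∀ acc cur, cur ≠ [] →
    pvFinalize (us.foldl (pvStepUnit maxc) (acc, cur))
      = acc ++ PySem.Chars.strip
          (cur ++ ((pvExtend maxc (cur.length : Int) us).1.map (fun v => v.2 ++ v.1)).flatten)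
        :: pvChunks maxc (pvExtend maxc (cur.length : Int) us).2 := by
  intro us
  induction us with
  | nil =>
    intro _ acc cur hcur
    simp [pvFinalize, pvExtend, pvChunks, hcur]
  | cons u us ih =>
    intro hne acc cur hcur
    have hu1 : u.1 ≠ [] := hne u (by simp)
    have hne' : ∀ v ∈ us, v.1 ≠ [] := fun v hv => hne v (by simp [hv])
    rw [List.foldl_cons]
    by_cases hfit : (cur.length : Int) + (u.2.length : Int) + (u.1.length : Int) ≤ maxc
    · -- unit joins the current chunk
      have hstep : pvStepUnit maxc (acc, cur) u = (acc, cur ++ u.2 ++ u.1) := by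
        unfold pvStepUnit
        simp only [hcur, ne_eq, not_false_iff, true_and]
        rw [if_neg (by omega)]
        simp
      rw [hstep]
      have hcur' : cur ++ u.2 ++ u.1 ≠ [] := by simp [hcur]
      have := ih hne' acc (cur ++ u.2 ++ u.1) hcur'
      rw [this]
      have hlen : (((cur ++ u.2 ++ u.1).length : Int))
          = (cur.length : Int) + (u.2.length : Int) + (u.1.length : Int) := by
        push_cast [List.length_append]; ring
      rw [hlen]
      rw [pvExtend_cons, if_pos hfit]
      simp only [List.map_cons, List.flatten_cons, List.append_assoc]
    · -- overflow: flush, start a new group at u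
      have hstep : pvStepUnit maxc (acc, cur) u = (acc ++ [PySem.Chars.strip cur], u.1) := by
        unfold pvStepUnit
        dsimp only
        rw [if_pos ⟨hcur, by omega⟩]
      rw [hstep]
      have := ih hne' (acc ++ [PySem.Chars.strip cur]) u.1 hu1
      rw [this]
      rw [pvExtend_cons, if_neg hfit]
      simp only [List.map_nil, List.flatten_nil, List.append_nil]
      rw [pvChunks_cons]
      simp

theorem finalize_foldl_eq_chunks (maxc : Int) (units : List (List Char × List Char))
    (hne : ∀ u ∈ units, u.1 ≠ []) :
    pvFinalize (units.foldl (pvStepUnit maxc) ([], [])) = pvChunks maxc units := by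
  cases units with
  | nil => simp [pvFinalize, pvChunks]
  | cons u us =>
    have hu1 : u.1 ≠ [] := hne u (by simp)
    have hne' : ∀ v ∈ us, v.1 ≠ [] := fun v hv => hne v (by simp [hv])
    rw [List.foldl_cons]
    have hstep : pvStepUnit maxc ([], []) u = ([], u.1) := by
      unfold pvStepUnit; simp
    rw [hstep, pack_eq maxc us hne' [] u.1 hu1]
    rw [pvChunks_cons]
    simp

-- ===== VERDICT (by name: the statement is the Claim_ definition above) =====
theorem chunk_text_for_f5_spec : Claim_equal_chunk_text_for_f5 := by
  intro text f5_config _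
  unfold Spec_chunk_text_for_f5 chunk_text_for_f5 chunk_text_for_f5_alt
  dsimp only
  rw [PySem.List.foldl_append_eq_flatMap, List.nil_append]
  split
  · rfl
  · rw [foldl_stepUnit_flat]
    have hne : ∀ u ∈ (pvSplitParas [] text.toList).flatMap
        (pvUnitsOf (PySem.Dict.getD (PySem.Dict.ofList f5_config) "chunk_max_chars" 350)), u.1 ≠ [] := by
      intro u hu
      obtain ⟨p, _, hp⟩ := List.mem_flatMap.mp hu
      exact unitsOf_ne_nil _ p u hp
    rw [← finalize_foldl_eq_chunks _ _ hne]
    rfl
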